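-- pv_equiv track=rewrite | github.com/mauricioDallOnder/Frances_Treinador_Pronuncia_IA | functions.py | tokenizar_palavra
-- ===== SOURCE A (Python) =====
-- grupos_consonantais_especiais = ['tch', 'dj', 'sj', 'dʒ', 'ks', 'ts', 'ch', 'nh', 'lh']
--
-- def tokenizar_palavra(palavra):
--     i = 0
--     tokens = []
--     while i < len(palavra):
--         matched = False
--         for gc in grupos_consonantais_especiais:
--             length = len(gc)
--             if i + length <= len(palavra) and palavra[i:i+length] == gc:
--                 tokens.append(gc)
--                 i += length
--                 matched = True
--                 break
--         if not matched:
--             tokens.append(palavra[i])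
--             i += 1
--     return tokens
-- ===== SOURCE B (Python) =====
-- # One-time first-character index (a depth-1 trie): at each position one dict
-- # lookup gives the few candidate suffixes, so the inner scan over all 9 groups
-- # disappears.
-- GRUPOS_POR_INICIAL = {
--     't': ['ch', 's'],
--     'd': ['j', '\u0292'],
--     's': ['j'],
--     'k': ['s'],
--     'c': ['h'],
--     'n': ['h'],
--     'l': ['h'],
-- }
--
-- def tokenizar_palavra(palavra):
--     tokens = []
--     i = 0
--     n = len(palavra)
--     while i < n:
--         c = palavra[i]
--         for suf in GRUPOS_POR_INICIAL.get(c, ()):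
--             j = i + 1 + len(suf)
--             if palavra[i + 1:j] == suf:
--                 tokens.append(c + suf)
--                 i = j
--                 break
--         else:
--             tokens.append(c)
--             i += 1
--     return tokens
-- ===== Notes on version B (the rewrite author's own statement) =====
-- stated objective: faster
-- what changed: B builds a one-time first-character index (a depth-1 trie: dict from initial char to its candidate suffixes in priority order), so A's inner per-position scan over all 9 group slices disappears: one dict lookup plus at most two short suffix comparisons per position.
import Mathlib
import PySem

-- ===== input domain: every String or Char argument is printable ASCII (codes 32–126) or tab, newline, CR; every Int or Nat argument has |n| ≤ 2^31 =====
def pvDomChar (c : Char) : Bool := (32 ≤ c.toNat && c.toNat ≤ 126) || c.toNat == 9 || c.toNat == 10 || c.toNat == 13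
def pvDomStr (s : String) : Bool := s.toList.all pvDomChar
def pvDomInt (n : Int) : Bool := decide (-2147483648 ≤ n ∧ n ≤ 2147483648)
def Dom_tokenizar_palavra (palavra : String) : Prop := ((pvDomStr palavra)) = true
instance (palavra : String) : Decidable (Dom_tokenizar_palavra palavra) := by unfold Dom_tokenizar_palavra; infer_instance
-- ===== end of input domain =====

-- B replaces A's per-position scan over all 9 groups by a one-time first-character
-- index (a depth-1 trie): one dict lookup plus at most two suffix comparisons per
-- position (objective: faster by a constant factor; same output on every string).

-- ===== PORT A =====
-- the module constant grupos_consonantais_especiais, as lists of chars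
def gruposConsonantaisEspeciais : List (List Char) :=
  [['t','c','h'], ['d','j'], ['s','j'], ['d','ʒ'], ['k','s'], ['t','s'], ['c','h'], ['n','h'], ['l','h']]

-- the inner 'for gc …: if …: break' loop: first group whose slice matches at the cursor
def findGC (cs : List Char) : List (List Char) → Option (List Char)
  | [] => none
  | g :: gs => if g.length ≤ cs.length ∧ cs.take g.length = g then some g else findGC cs gs

-- cited by loopA's decreasing_by: a matched group comes from the group list
theorem findGC_mem {cs g : List Char} : ∀ {gs : List (List Char)}, findGC cs gs = some g → g ∈ gs := by
  intro gs
  induction gs with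
  | nil => intro h; simp [findGC] at h
  | cons a as ih =>
    intro h
    by_cases hc : a.length ≤ cs.length ∧ cs.take a.length = a
    · simp [findGC, hc] at h; simp [h]
    · simp [findGC, hc] at h; exact List.mem_cons_of_mem _ (ih h)

-- A's while loop over the cursor i, carried as the remaining suffix of the word
def loopA (cs : List Char) : List String :=
  match cs with
  | [] => []
  | c :: rest =>
    match hg : findGC (c :: rest) gruposConsonantaisEspeciais with
    | some g => String.ofList g :: loopA ((c :: rest).drop g.length)
    | none => String.ofList [c] :: loopA rest
termination_by cs.length
decreasing_by
  · have hmem := findGC_mem hg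
    have hlen : 1 ≤ g.length := by
      fin_cases hmem <;> simp
    simp only [List.length_drop, List.length_cons]
    omega
  · simp

def tokenizar_palavra (palavra : String) : List String := loopA palavra.toList

-- ===== PORT B =====
-- the Python dict GRUPOS_POR_INICIAL: first char -> candidate suffixes in priority order
def gruposPorInicial : PySem.Dict Char (List (List Char)) :=
  PySem.Dict.ofList
    [('t', [['c','h'], ['s']]), ('d', [['j'], ['ʒ']]), ('s', [['j']]),
     ('k', [['s']]), ('c', [['h']]), ('n', [['h']]), ('l', [['h']])]

-- the inner 'for suf …: if …: break' loop over the candidate suffixes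
def findSuf (rest : List Char) : List (List Char) → Option (List Char)
  | [] => none
  | s :: ss => if s.length ≤ rest.length ∧ rest.take s.length = s then some s else findSuf rest ss

-- B's while loop, carried as the remaining suffix of the word
def loopB (cs : List Char) : List String :=
  match cs with
  | [] => []
  | c :: rest =>
    match findSuf rest (gruposPorInicial.getD c []) with
    | some suf => String.ofList (c :: suf) :: loopB (rest.drop suf.length)
    | none => String.ofList [c] :: loopB rest
termination_by cs.length
decreasing_by
  · simp only [List.length_drop, List.length_cons]; omega
  · simp

def tokenizar_palavra_alt (palavra : String) : List String := loopB palavra.toList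

-- ===== PRECONDITION & SPEC =====
def Spec_tokenizar_palavra (palavra : String) (out : List String) : Prop := out = tokenizar_palavra_alt palavra
instance (palavra : String) (out : List String) : Decidable (Spec_tokenizar_palavra palavra out) := by unfold Spec_tokenizar_palavra; infer_instance

-- ===== CLAIM (what is proved, stated in full; the proofs are below) =====
def Claim_equal_tokenizar_palavra : Prop := ∀ (palavra : String), Dom_tokenizar_palavra palavra → Spec_tokenizar_palavra palavra (tokenizar_palavra palavra)

-- ===== LEMMAS AND PROOFS =====

-- closed-form evaluations of the first-character index
theorem getD_t : gruposPorInicial.getD 't' [] = [['c','h'], ['s']] := by rfl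
theorem getD_d : gruposPorInicial.getD 'd' [] = [['j'], ['ʒ']] := by rfl
theorem getD_s : gruposPorInicial.getD 's' [] = [['j']] := by rfl
theorem getD_k : gruposPorInicial.getD 'k' [] = [['s']] := by rfl
theorem getD_c : gruposPorInicial.getD 'c' [] = [['h']] := by rfl
theorem getD_n : gruposPorInicial.getD 'n' [] = [['h']] := by rfl
theorem getD_l : gruposPorInicial.getD 'l' [] = [['h']] := by rfl
theorem getD_other (c : Char) (h1 : c ≠ 't') (h2 : c ≠ 'd') (h3 : c ≠ 's') (h4 : c ≠ 'k')
    (h5 : c ≠ 'c') (h6 : c ≠ 'n') (h7 : c ≠ 'l') : gruposPorInicial.getD c [] = [] := by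
  have e1 : ('t' == c) = false := by simp [Ne.symm h1]
  have e2 : ('d' == c) = false := by simp [Ne.symm h2]
  have e3 : ('s' == c) = false := by simp [Ne.symm h3]
  have e4 : ('k' == c) = false := by simp [Ne.symm h4]
  have e5 : ('c' == c) = false := by simp [Ne.symm h5]
  have e6 : ('n' == c) = false := by simp [Ne.symm h6]
  have e7 : ('l' == c) = false := by simp [Ne.symm h7]
  simp [gruposPorInicial, PySem.Dict.getD, PySem.Dict.get?, PySem.Dict.ofList, PySem.Dict.update,
    PySem.Dict.empty, PySem.Dict.insert, PySem.Dict.contains,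
    List.find?, e1, e2, e3, e4, e5, e6, e7]

-- at a head c :: rest the two inner loops find the same token
theorem match_eq (c : Char) (rest : List Char) :
    findGC (c :: rest) gruposConsonantaisEspeciais
      = (findSuf rest (gruposPorInicial.getD c [])).map (fun s => c :: s) := by
  by_cases h1 : c = 't' <;> by_cases h2 : c = 'd' <;> by_cases h3 : c = 's' <;>
    by_cases h4 : c = 'k' <;> by_cases h5 : c = 'c' <;> by_cases h6 : c = 'n' <;>
    by_cases h7 : c = 'l' <;> subst_vars <;>
    first
      | (rw [getD_other c h1 h2 h3 h4 h5 h6 h7]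
         rcases rest with _ | ⟨a, _ | ⟨b, tb⟩⟩ <;>
           simp_all [findGC, findSuf, gruposConsonantaisEspeciais, List.take])
      | (simp only [getD_t, getD_d, getD_s, getD_k, getD_c, getD_n, getD_l]
         rcases rest with _ | ⟨a, _ | ⟨b, tb⟩⟩ <;>
           simp_all [findGC, findSuf, gruposConsonantaisEspeciais, List.take] <;>
           split_ifs <;> simp_all)

theorem loop_eq (cs : List Char) : loopA cs = loopB cs := by
  induction cs using loopA.induct with
  | case1 => simp [loopA, loopB]
  | case2 c rest g hg ih =>
    have hm := match_eq c rest
    rw [hg] at hm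
    rw [loopA.eq_def, loopB.eq_def]
    cases hsf : findSuf rest (gruposPorInicial.getD c []) with
    | none => rw [hsf] at hm; simp at hm
    | some suf =>
      rw [hsf] at hm
      simp only [Option.map_some, Option.some.injEq] at hm
      subst hm
      simp only [hsf]
      split
      next g' hg' =>
        rw [hg] at hg'
        injection hg' with h
        subst h
        simp only [List.length_cons, List.drop_succ_cons] at ih ⊢
        rw [ih]
      next hg' => rw [hg] at hg'; cases hg'
  | case3 c rest hg ih =>
    have hm := match_eq c rest
    rw [hg] at hm
    rw [loopA.eq_def, loopB.eq_def]
    cases hsf : findSuf rest (gruposPorInicial.getD c []) with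
    | some suf => rw [hsf] at hm; simp at hm
    | none =>
      simp only [hsf]
      split
      next g' hg' => rw [hg] at hg'; cases hg'
      next hg' => rw [ih]

-- ===== VERDICT (by name: the statement is the Claim_ definition above) =====
theorem tokenizar_palavra_spec : Claim_equal_tokenizar_palavra := by
  intro palavra _
  unfold Spec_tokenizar_palavra tokenizar_palavra tokenizar_palavra_alt
  exact loop_eq palavra.toList
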